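-- pv_equiv track=rewrite | github.com/pypi-data/pypi-mirror-262 | packages/vizmath/vizmath-0.0.25-py3-none-any.whl/build/lib/build/lib/build/lib/build/lib/build/lib/build/lib/build/lib/build/lib/vizmath/examples/quadtile_chart/packing_medium.py | place_shapes_in_grid
-- ===== SOURCE A (Python) =====
-- def place_shapes_in_grid(sizes, grid_size, largest_size, shape_type):
--     center = grid_size // 2
--     positions = [(center, center)]  # Start with the largest shape in the center
--     directions = [(-1, 0), (0, -1), (1, 0), (0, 1)]  # Left, Down, Right, Up
--     dir_idx = 0
--     steps = 1
--     x, y = center, center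
--     for size in sizes[1:]:
--         for _ in range(2):
--             for _ in range(steps):
--                 dx, dy = directions[dir_idx]
--                 x, y = x + dx * largest_size, y + dy * largest_size
--                 if 0 <= x < grid_size and 0 <= y < grid_size:
--                     positions.append((x, y))
--             dir_idx = (dir_idx + 1) % 4
--         steps += 1
--     return positions
--
-- sizes = 9
-- ===== SOURCE B (Python) =====
-- def _ring(k):
--     # ring k of the spiral, in unscaled offset coordinates: sign and start offset
--     # (b, b) come in closed form from k's parity; the two legs are coordinate
--     # formulas over t = 1..k -- no carried position or direction state.
--     s = -1 if k % 2 == 1 else 1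
--     b = (k - 1) // 2 if k % 2 == 1 else -(k // 2)
--     for t in range(1, k + 1):
--         yield (b + s * t, b)
--     for t in range(1, k + 1):
--         yield (b + s * k, b + s * t)
--
-- def place_shapes_in_grid(sizes, grid_size, largest_size, shape_type):
--     center = grid_size // 2
--     out = [(center, center)]
--     for k in range(1, len(sizes)):
--         for (u, v) in _ring(k):
--             x, y = center + u * largest_size, center + v * largest_size
--             if 0 <= x < grid_size and 0 <= y < grid_size:
--                 out.append((x, y))
--     return out
-- ===== Notes on version B (the rewrite author's own statement) =====
-- stated objective: alternative
-- what changed: A walks the spiral statefully (running position, cycling direction index, growing step counter); B carries no walk state at all: each ring k's start offset and two legs are written down in closed form from k's parity, and its cells are then scaled by largest_size around the center and bounds-filtered.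
import Mathlib
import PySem

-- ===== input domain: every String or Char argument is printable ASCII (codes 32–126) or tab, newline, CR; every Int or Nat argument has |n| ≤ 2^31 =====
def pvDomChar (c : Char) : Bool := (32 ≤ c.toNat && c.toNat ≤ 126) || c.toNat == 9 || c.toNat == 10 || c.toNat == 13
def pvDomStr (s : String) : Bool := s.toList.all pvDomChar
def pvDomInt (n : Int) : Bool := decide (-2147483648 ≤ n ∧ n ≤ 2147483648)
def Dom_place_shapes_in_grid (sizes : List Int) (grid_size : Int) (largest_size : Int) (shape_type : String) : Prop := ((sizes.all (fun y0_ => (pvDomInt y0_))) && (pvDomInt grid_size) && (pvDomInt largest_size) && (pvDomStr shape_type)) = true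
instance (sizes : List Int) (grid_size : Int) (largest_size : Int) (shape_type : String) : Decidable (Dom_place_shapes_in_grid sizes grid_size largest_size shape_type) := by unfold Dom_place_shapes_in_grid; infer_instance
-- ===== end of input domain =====

-- B replaces A's stateful spiral walk (running position, direction index, step counter)
-- by closed-form ring geometry: each ring k's start offset and two legs are written down
-- directly from k's parity, with no carried position state (objective: alternative).

-- ===== PORT A =====
-- loop bodies are named top-level helpers so the proofs can refer to them; each is the
-- literal body of the corresponding Python loop. State: (positions, dir_idx, steps, x, y).
def aInnerStep (grid_size largest_size : Int) (directions : List (Int × Int))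
    (v : List (Int × Int) × Int × Int × Int × Int) (_ : Nat) :
    List (Int × Int) × Int × Int × Int × Int :=
  let d := (PySem.List.pyGet? directions v.2.1).getD (0, 0)  -- directions[dir_idx]; dir_idx is always 0..3
  let x := v.2.2.2.1 + d.1 * largest_size
  let y := v.2.2.2.2 + d.2 * largest_size
  let positions := if 0 ≤ x ∧ x < grid_size ∧ (0 ≤ y ∧ y < grid_size) then v.1 ++ [(x, y)] else v.1
  (positions, v.2.1, v.2.2.1, x, y)

def aArmStep (grid_size largest_size : Int) (directions : List (Int × Int))
    (t : List (Int × Int) × Int × Int × Int × Int) (_ : Nat) :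
    List (Int × Int) × Int × Int × Int × Int :=
  let u := (List.range t.2.2.1.toNat).foldl (aInnerStep grid_size largest_size directions) t
  (u.1, PySem.Int.mod (u.2.1 + 1) 4, u.2.2)

def aShapeStep (grid_size largest_size : Int) (directions : List (Int × Int))
    (s : List (Int × Int) × Int × Int × Int × Int) (_ : Int) :
    List (Int × Int) × Int × Int × Int × Int :=
  let s2 := (List.range 2).foldl (aArmStep grid_size largest_size directions) s
  (s2.1, s2.2.1, s2.2.2.1 + 1, s2.2.2.2)

def place_shapes_in_grid (sizes : List Int) (grid_size : Int) (largest_size : Int) (shape_type : String) : List (Int × Int) :=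
  let center := PySem.Int.floordiv grid_size 2
  let directions : List (Int × Int) := [(-1, 0), (0, -1), (1, 0), (0, 1)]
  let st := (sizes.drop 1).foldl (aShapeStep grid_size largest_size directions)
      ([(center, center)], 0, 1, center, center)
  st.1

-- ===== PORT B =====
-- ring k of the spiral, in unscaled offset coordinates: sign s and start offset (b, b)
-- come in closed form from k's parity; the two legs are coordinate formulas over t = 1..k.
def bRing (k : Nat) : List (Int × Int) :=
  let s : Int := if k % 2 = 1 then -1 else 1
  let b : Int := if k % 2 = 1 then (((k - 1) / 2 : Nat) : Int) else -((k / 2 : Nat) : Int)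
  ((List.range' 1 k).map (fun (t : Nat) => (b + s * (t : Int), b)))
    ++ ((List.range' 1 k).map (fun (t : Nat) => (b + s * (k : Int), b + s * (t : Int))))

-- body of B's second loop: scale an offset cell and append it if in bounds
def bPlace (grid_size largest_size center : Int)
    (acc : List (Int × Int)) (p : Int × Int) : List (Int × Int) :=
  let x := center + p.1 * largest_size
  let y := center + p.2 * largest_size
  if 0 ≤ x ∧ x < grid_size ∧ (0 ≤ y ∧ y < grid_size) then acc ++ [(x, y)] else acc

def place_shapes_in_grid_alt (sizes : List Int) (grid_size : Int) (largest_size : Int) (shape_type : String) : List (Int × Int) :=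
  let center := PySem.Int.floordiv grid_size 2
  (List.range' 1 (sizes.length - 1)).foldl
    (fun acc k => (bRing k).foldl (bPlace grid_size largest_size center) acc)
    [(center, center)]

-- ===== PRECONDITION & SPEC =====
def Spec_place_shapes_in_grid (sizes : List Int) (grid_size : Int) (largest_size : Int) (shape_type : String) (out : List (Int × Int)) : Prop := out = place_shapes_in_grid_alt sizes grid_size largest_size shape_type
instance (sizes : List Int) (grid_size : Int) (largest_size : Int) (shape_type : String) (out : List (Int × Int)) : Decidable (Spec_place_shapes_in_grid sizes grid_size largest_size shape_type out) := by unfold Spec_place_shapes_in_grid; infer_instance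

-- ===== CLAIM (what is proved, stated in full; the proofs are below) =====
def Claim_equal_place_shapes_in_grid : Prop := ∀ (sizes : List Int) (grid_size : Int) (largest_size : Int) (shape_type : String), Dom_place_shapes_in_grid sizes grid_size largest_size shape_type → Spec_place_shapes_in_grid sizes grid_size largest_size shape_type (place_shapes_in_grid sizes grid_size largest_size shape_type)

-- ===== LEMMAS AND PROOFS =====

def dirsL : List (Int × Int) := [(-1, 0), (0, -1), (1, 0), (0, 1)]

def inB (g : Int) (p : Int × Int) : Bool := decide (0 ≤ p.1 ∧ p.1 < g ∧ (0 ≤ p.2 ∧ p.2 < g))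

-- the raw (unfiltered) cells recorded during one arm of n steps in direction d
def armGo (ls : Int) (d : Int × Int) : Nat → Int → Int → List (Int × Int)
  | 0, _, _ => []
  | n + 1, x, y => (x + d.1 * ls, y + d.2 * ls) :: armGo ls d n (x + d.1 * ls) (y + d.2 * ls)

-- the raw spiral path of m shapes starting at step count k, with final coordinates
def spiralGo (ls : Int) : Nat → Nat → Int → Int → List (Int × Int) × Int × Int
  | 0, _, x, y => ([], x, y)
  | m + 1, k, x, y =>
    let d1 := dirsL.getD ((2 * (k - 1)) % 4) (0, 0)
    let p1 := x + k * d1.1 * ls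
    let q1 := y + k * d1.2 * ls
    let d2 := dirsL.getD ((2 * (k - 1) + 1) % 4) (0, 0)
    let p2 := p1 + k * d2.1 * ls
    let q2 := q1 + k * d2.2 * ls
    let r := spiralGo ls m (k + 1) p2 q2
    (armGo ls d1 k x y ++ (armGo ls d2 k p1 q1 ++ r.1), r.2)

-- start offset of ring K+1 (= position after K complete rings), unscaled
def Bse (K : Nat) : Int := if K % 2 = 0 then ((K / 2 : Nat) : Int) else -(((K + 1) / 2 : Nat) : Int)

theorem foldl_ignore {s a : Type} (g : s → s) (f : s → a → s) (hgf : ∀ st x, f st x = g st)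
    (l : List a) (init : s) : l.foldl f init = g^[l.length] init := by
  induction l generalizing init with
  | nil => rfl
  | cons b l ih => simp [List.foldl_cons, hgf, ih, Function.iterate_succ_apply]

theorem armA (g ls : Int) (dirs : List (Int × Int)) (di steps : Int) (n : Nat) :
    ∀ (acc : List (Int × Int)) (x y : Int),
    (fun v => aInnerStep g ls dirs v 0)^[n] (acc, di, steps, x, y)
    = (acc ++ (armGo ls ((PySem.List.pyGet? dirs di).getD (0, 0)) n x y).filter (inB g),
       di, steps,
       x + n * ((PySem.List.pyGet? dirs di).getD (0, 0)).1 * ls,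
       y + n * ((PySem.List.pyGet? dirs di).getD (0, 0)).2 * ls) := by
  induction n with
  | zero => intro acc x y; simp [armGo]
  | succ n ih =>
    intro acc x y
    rw [Function.iterate_succ_apply]
    set d := (PySem.List.pyGet? dirs di).getD (0, 0) with hd
    have harg : aInnerStep g ls dirs (acc, di, steps, x, y) 0
        = ((if 0 ≤ x + d.1 * ls ∧ x + d.1 * ls < g ∧ (0 ≤ y + d.2 * ls ∧ y + d.2 * ls < g)
            then acc ++ [(x + d.1 * ls, y + d.2 * ls)] else acc),
           di, steps, x + d.1 * ls, y + d.2 * ls) := rfl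
    rw [harg, ih]
    refine Prod.ext ?_ (Prod.ext rfl (Prod.ext rfl
      (Prod.ext (by push_cast; ring) (by push_cast; ring))))
    simp only [armGo, List.filter_cons, inB]
    by_cases h : 0 ≤ x + d.1 * ls ∧ x + d.1 * ls < g ∧ (0 ≤ y + d.2 * ls ∧ y + d.2 * ls < g)
    · simp [h, List.append_assoc]
    · simp [h]

theorem getD_dirsL (dn : Nat) :
    (PySem.List.pyGet? dirsL (dn : Int)).getD (0, 0) = dirsL.getD dn (0, 0) := by
  rw [PySem.List.pyGet?_natCast, List.getD_eq_getElem?_getD]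

theorem aArmStep_eval (g ls : Int) (di : Int) (k : Nat) (acc : List (Int × Int)) (x y : Int)
    (j : Nat) :
    aArmStep g ls dirsL (acc, di, (k : Int), x, y) j
    = (acc ++ (armGo ls ((PySem.List.pyGet? dirsL di).getD (0, 0)) k x y).filter (inB g),
       PySem.Int.mod (di + 1) 4, (k : Int),
       x + k * ((PySem.List.pyGet? dirsL di).getD (0, 0)).1 * ls,
       y + k * ((PySem.List.pyGet? dirsL di).getD (0, 0)).2 * ls) := by
  show (let u := (List.range ((k : Int)).toNat).foldl (aInnerStep g ls dirsL)
          (acc, di, (k : Int), x, y)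
        ((u.1, PySem.Int.mod (u.2.1 + 1) 4, u.2.2) :
          List (Int × Int) × Int × Int × Int × Int)) = _
  rw [foldl_ignore (fun v => aInnerStep g ls dirsL v 0) (aInnerStep g ls dirsL)
      (fun st xx => rfl), List.length_range, Int.toNat_natCast, armA]

theorem mainA (g ls : Int) :
    ∀ (l : List Int) (k : Nat) (acc : List (Int × Int)) (x y : Int), 1 ≤ k →
    l.foldl (aShapeStep g ls dirsL)
        (acc, (((2 * (k - 1)) % 4 : Nat) : Int), (k : Int), x, y)
    = (acc ++ (spiralGo ls l.length k x y).1.filter (inB g),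
       (((2 * (k - 1 + l.length)) % 4 : Nat) : Int), ((k + l.length : Nat) : Int),
       (spiralGo ls l.length k x y).2.1, (spiralGo ls l.length k x y).2.2) := by
  intro l
  induction l with
  | nil => intro k acc x y hk; simp [spiralGo]
  | cons a l ih =>
    intro k acc x y hk
    rw [List.foldl_cons]
    have hdi2 : PySem.Int.mod ((((2 * (k - 1)) % 4 : Nat) : Int) + 1) 4
        = (((2 * (k - 1) + 1) % 4 : Nat) : Int) := by
      rw [PySem.Int.mod_eq_emod_of_pos (by norm_num)]; omega
    have hdi3 : PySem.Int.mod ((((2 * (k - 1) + 1) % 4 : Nat) : Int) + 1) 4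
        = (((2 * ((k + 1) - 1)) % 4 : Nat) : Int) := by
      rw [PySem.Int.mod_eq_emod_of_pos (by norm_num)]; omega
    have hstep : aShapeStep g ls dirsL
          (acc, (((2 * (k - 1)) % 4 : Nat) : Int), (k : Int), x, y) a
        = (acc ++ ((armGo ls (dirsL.getD ((2 * (k - 1)) % 4) (0, 0)) k x y).filter (inB g)
             ++ (armGo ls (dirsL.getD ((2 * (k - 1) + 1) % 4) (0, 0)) k
                  (x + k * (dirsL.getD ((2 * (k - 1)) % 4) (0, 0)).1 * ls)
                  (y + k * (dirsL.getD ((2 * (k - 1)) % 4) (0, 0)).2 * ls)).filter (inB g)),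
           (((2 * ((k + 1) - 1)) % 4 : Nat) : Int), ((k + 1 : Nat) : Int),
           x + k * (dirsL.getD ((2 * (k - 1)) % 4) (0, 0)).1 * ls
             + k * (dirsL.getD ((2 * (k - 1) + 1) % 4) (0, 0)).1 * ls,
           y + k * (dirsL.getD ((2 * (k - 1)) % 4) (0, 0)).2 * ls
             + k * (dirsL.getD ((2 * (k - 1) + 1) % 4) (0, 0)).2 * ls) := by
      show (let s2 := (List.range 2).foldl (aArmStep g ls dirsL)
              (acc, (((2 * (k - 1)) % 4 : Nat) : Int), (k : Int), x, y)
            ((s2.1, s2.2.1, s2.2.2.1 + 1, s2.2.2.2) :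
              List (Int × Int) × Int × Int × Int × Int)) = _
      rw [show List.range 2 = [0, 1] from rfl, List.foldl_cons, List.foldl_cons, List.foldl_nil]
      rw [aArmStep_eval, hdi2, aArmStep_eval, hdi3, getD_dirsL, getD_dirsL]
      refine Prod.ext (by simp [List.append_assoc]) (Prod.ext rfl
        (Prod.ext (by push_cast; ring) (Prod.ext rfl rfl)))
    rw [hstep, ih (k + 1) _ _ _ (by omega)]
    simp only [spiralGo, List.filter_append, List.length_cons]
    refine Prod.ext (by simp [List.append_assoc]) (Prod.ext (by dsimp only; omega)
      (Prod.ext (by dsimp only; omega) (Prod.ext rfl rfl)))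

-- B-side lemmas

theorem range'_shift_map {α : Type} (f : Nat → α) : ∀ (n a : Nat),
    (List.range' (a + 1) n).map f = (List.range' a n).map (fun t => f (t + 1)) := by
  intro n
  induction n with
  | zero => intro a; rfl
  | succ n ih => intro a; simp [List.range'_succ, ih (a + 1)]

theorem armGo_map (ls : Int) (d : Int × Int) : ∀ (n : Nat) (x y : Int),
    armGo ls d n x y
    = (List.range' 1 n).map
        (fun (t : Nat) => (x + (t : Int) * d.1 * ls, y + (t : Int) * d.2 * ls)) := by
  intro n
  induction n with
  | zero => intro x y; rfl
  | succ n ih =>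
    intro x y
    rw [armGo, ih, List.range'_succ, List.map_cons, range'_shift_map _ n 1]
    refine congrArg₂ _ (by push_cast; ring_nf) ?_
    apply List.map_congr_left
    intro t ht
    push_cast
    refine Prod.ext ?_ ?_ <;> simp <;> ring

theorem foldl_bPlace (g ls c : Int) : ∀ (l : List (Int × Int)) (acc : List (Int × Int)),
    l.foldl (bPlace g ls c) acc
    = acc ++ (l.map (fun p => (c + p.1 * ls, c + p.2 * ls))).filter (inB g) := by
  intro l
  induction l with
  | nil => intro acc; simp
  | cons p l ih =>
    intro acc
    rw [List.foldl_cons, ih, List.map_cons, List.filter_cons]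
    by_cases h : 0 ≤ c + p.1 * ls ∧ c + p.1 * ls < g ∧ (0 ≤ c + p.2 * ls ∧ c + p.2 * ls < g)
    · simp [bPlace, inB, h, List.append_assoc]
    · simp [bPlace, inB, h]

theorem foldl_rings (g ls c : Int) : ∀ (l : List Nat) (acc : List (Int × Int)),
    l.foldl (fun acc k => (bRing k).foldl (bPlace g ls c) acc) acc
    = acc ++ ((l.flatMap bRing).map (fun p => (c + p.1 * ls, c + p.2 * ls))).filter (inB g) := by
  intro l
  induction l with
  | nil => intro acc; simp
  | cons k l ih =>
    intro acc
    rw [List.foldl_cons, foldl_bPlace, ih, List.flatMap_cons, List.map_append,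
      List.filter_append, List.append_assoc]

theorem spiralGo_succ_odd (ls : Int) (m k : Nat) (h : k % 2 = 1) (x y : Int) :
    spiralGo ls (m + 1) k x y
    = (armGo ls (-1, 0) k x y
        ++ (armGo ls (0, -1) k (x - k * ls) y
            ++ (spiralGo ls m (k + 1) (x - k * ls) (y - k * ls)).1),
       (spiralGo ls m (k + 1) (x - k * ls) (y - k * ls)).2) := by
  have h1 : (2 * (k - 1)) % 4 = 0 := by omega
  have h2 : (2 * (k - 1) + 1) % 4 = 1 := by omega
  simp only [spiralGo, h1, h2]
  norm_num [dirsL]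
  constructor <;> ring_nf

theorem spiralGo_succ_even (ls : Int) (m k : Nat) (hk : 1 ≤ k) (h : k % 2 = 0) (x y : Int) :
    spiralGo ls (m + 1) k x y
    = (armGo ls (1, 0) k x y
        ++ (armGo ls (0, 1) k (x + k * ls) y
            ++ (spiralGo ls m (k + 1) (x + k * ls) (y + k * ls)).1),
       (spiralGo ls m (k + 1) (x + k * ls) (y + k * ls)).2) := by
  have h1 : (2 * (k - 1)) % 4 = 2 := by omega
  have h2 : (2 * (k - 1) + 1) % 4 = 3 := by omega
  simp only [spiralGo, h1, h2]
  norm_num [dirsL]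

theorem mainB (ls c : Int) : ∀ (m k : Nat), 1 ≤ k →
    spiralGo ls m k (c + Bse (k - 1) * ls) (c + Bse (k - 1) * ls)
    = (((List.range' k m).flatMap bRing).map (fun p => (c + p.1 * ls, c + p.2 * ls)),
       c + Bse (k - 1 + m) * ls, c + Bse (k - 1 + m) * ls) := by
  intro m
  induction m with
  | zero => intro k hk; simp [spiralGo]
  | succ m ih =>
    intro k hk
    rw [List.range'_succ, List.flatMap_cons, List.map_append]
    have hfin : k - 1 + (m + 1) = k + m := by omega
    rw [hfin]
    have ih' := ih (k + 1) (by omega)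
    simp only [Nat.add_sub_cancel] at ih'
    by_cases hpar : k % 2 = 1
    · -- odd ring: legs go left then down
      have hb : Bse (k - 1) = (((k - 1) / 2 : Nat) : Int) := by
        unfold Bse; rw [if_pos (by omega)]
      have key : (((k - 1) / 2 : Nat) : Int) - (k : Int) = -(((k + 1) / 2 : Nat) : Int) := by
        omega
      have hb' : Bse k = (((k - 1) / 2 : Nat) : Int) - (k : Int) := by
        unfold Bse; rw [if_neg (by omega)]; omega
      have harg : c + Bse (k - 1) * ls - (k : Int) * ls = c + Bse k * ls := by
        rw [hb, hb']; ring
      rw [spiralGo_succ_odd ls m k hpar, harg, ih']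
      refine Prod.ext ?_ rfl
      simp only []
      rw [← List.append_assoc]
      refine congrArg₂ _ ?_ rfl
      simp only [bRing, if_pos hpar, List.map_append, armGo_map]
      simp only [List.map_map]
      refine congrArg₂ _ ?_ ?_
      · apply List.map_congr_left
        intro t ht
        rw [hb]
        refine Prod.ext ?_ ?_ <;> · simp only [Function.comp_apply]; ring
      · apply List.map_congr_left
        intro t ht
        rw [hb', hb]
        refine Prod.ext ?_ ?_ <;> · simp only [Function.comp_apply]; ring
    · -- even ring: legs go right then up
      have hk2 : k % 2 = 0 := by omega
      have hb : Bse (k - 1) = -(((k / 2 : Nat)) : Int) := by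
        unfold Bse; rw [if_neg (by omega)]; omega
      have hb' : Bse k = -(((k / 2 : Nat)) : Int) + (k : Int) := by
        unfold Bse; rw [if_pos hk2]; omega
      have harg : c + Bse (k - 1) * ls + (k : Int) * ls = c + Bse k * ls := by
        rw [hb, hb']; ring
      rw [spiralGo_succ_even ls m k hk hk2, harg, ih']
      refine Prod.ext ?_ rfl
      simp only []
      rw [← List.append_assoc]
      refine congrArg₂ _ ?_ rfl
      simp only [bRing, if_neg hpar, List.map_append, armGo_map]
      simp only [List.map_map]
      refine congrArg₂ _ ?_ ?_
      · apply List.map_congr_left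
        intro t ht
        rw [hb]
        refine Prod.ext ?_ ?_ <;> · simp only [Function.comp_apply]; ring
      · apply List.map_congr_left
        intro t ht
        rw [hb', hb]
        refine Prod.ext ?_ ?_ <;> · simp only [Function.comp_apply]; ring

-- ===== VERDICT (by name: the statement is the Claim_ definition above) =====
theorem place_shapes_in_grid_spec : Claim_equal_place_shapes_in_grid := by
  intro sizes grid_size largest_size shape_type _
  unfold Spec_place_shapes_in_grid
  have hdirs : ([(-1, 0), (0, -1), (1, 0), (0, 1)] : List (Int × Int)) = dirsL := rfl
  have hA : place_shapes_in_grid sizes grid_size largest_size shape_type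
      = (PySem.Int.floordiv grid_size 2, PySem.Int.floordiv grid_size 2) ::
        (spiralGo largest_size (sizes.length - 1) 1
          (PySem.Int.floordiv grid_size 2) (PySem.Int.floordiv grid_size 2)).1.filter
          (inB grid_size) := by
    simp only [place_shapes_in_grid]
    rw [hdirs]
    rw [show (1 : Int) = ((1 : Nat) : Int) from rfl]
    rw [show (0 : Int) = (((2 * ((1:Nat) - 1)) % 4 : Nat) : Int) from rfl]
    rw [mainA grid_size largest_size (sizes.drop 1) 1 _ _ _ (le_refl 1)]
    simp
  have hstart : PySem.Int.floordiv grid_size 2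
      = PySem.Int.floordiv grid_size 2 + Bse (1 - 1) * largest_size := by
    simp [Bse]
  have hB : place_shapes_in_grid_alt sizes grid_size largest_size shape_type
      = (PySem.Int.floordiv grid_size 2, PySem.Int.floordiv grid_size 2) ::
        (spiralGo largest_size (sizes.length - 1) 1
          (PySem.Int.floordiv grid_size 2) (PySem.Int.floordiv grid_size 2)).1.filter
          (inB grid_size) := by
    simp only [place_shapes_in_grid_alt]
    rw [foldl_rings]
    rw [show spiralGo largest_size (sizes.length - 1) 1
          (PySem.Int.floordiv grid_size 2) (PySem.Int.floordiv grid_size 2)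
        = spiralGo largest_size (sizes.length - 1) 1
          (PySem.Int.floordiv grid_size 2 + Bse (1 - 1) * largest_size)
          (PySem.Int.floordiv grid_size 2 + Bse (1 - 1) * largest_size) from by rw [← hstart]]
    rw [mainB largest_size (PySem.Int.floordiv grid_size 2) (sizes.length - 1) 1 (le_refl 1)]
    simp
  rw [hA, hB]
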